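-- pv_equiv track=rewrite | github.com/ukuleletrip/sosclient | ogcsosapi.py | get_cn_tag
-- ===== SOURCE A (Python) =====
-- def get_cn_tag(path, namespaces):
--     """convert qname to clark notation in specified XPath
--
--     Args:
--       path (str): XPath
--       path (dict): namespace dictionary such as get_namespaces creates
--
--     Returns:
--       str: converted XPath
--
--     """
--     tags = path.split('/')
--     cn_tags = []
--     for tag in tags:
--         elems = tag.split(':')
--         if len(elems) == 2 and elems[0] in namespaces:
--             cn_tags.append('{' + namespaces[elems[0]] + '}' + elems[1])
--         else:
--             cn_tags.append(tag)
--
--     return '/'.join(cn_tags)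
-- ===== SOURCE B (Python) =====
-- def _segment(pre, post, colons, namespaces):
--     if colons == 1 and pre in namespaces:
--         return '{' + namespaces[pre] + '}' + post
--     if colons == 0:
--         return pre
--     return pre + ':' + post
--
--
-- def get_cn_tag(path, namespaces):
--     """Single left-to-right character scan: track the current segment as
--     (text-before-first-colon, text-after-first-colon, colon count) and emit
--     each segment on '/' or at the end; no split/join of intermediate lists
--     of segment pieces."""
--     out = []
--     pre, post, colons = '', '', 0
--     for ch in path:
--         if ch == '/':
--             out.append(_segment(pre, post, colons, namespaces))
--             pre, post, colons = '', '', 0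
--         elif ch == ':':
--             colons += 1
--             if colons > 1:
--                 post += ':'
--         elif colons == 0:
--             pre += ch
--         else:
--             post += ch
--     out.append(_segment(pre, post, colons, namespaces))
--     return '/'.join(out)
-- ===== Notes on version B (the rewrite author's own statement) =====
-- stated objective: alternative
-- what changed: A splits the path on '/', re-splits each segment on ':' and joins the results; B makes a single left-to-right character scan over the path, tracking per segment the text before the first colon, the text after it and the colon count, emitting each converted segment at '/' or at end of input.
import Mathlib
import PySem

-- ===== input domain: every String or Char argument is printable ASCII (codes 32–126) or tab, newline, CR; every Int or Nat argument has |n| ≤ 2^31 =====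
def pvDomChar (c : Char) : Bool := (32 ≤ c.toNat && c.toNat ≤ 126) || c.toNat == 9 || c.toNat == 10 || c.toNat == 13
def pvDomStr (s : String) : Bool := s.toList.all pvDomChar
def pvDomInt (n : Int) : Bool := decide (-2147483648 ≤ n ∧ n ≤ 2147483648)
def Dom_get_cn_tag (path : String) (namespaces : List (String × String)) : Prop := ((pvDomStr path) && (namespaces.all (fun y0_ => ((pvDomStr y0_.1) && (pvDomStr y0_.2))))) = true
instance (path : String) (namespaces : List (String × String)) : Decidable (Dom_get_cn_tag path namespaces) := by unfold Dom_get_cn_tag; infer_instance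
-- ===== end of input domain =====

-- B replaces A's split-on-'/' / split-on-':' / join pipeline by a single left-to-right
-- character scan that tracks (prefix, suffix, colon count) per segment; objective: alternative.


-- ===== PORT A =====
-- tags = path.split('/'); loop appending the per-tag result; '/'.join.  The dict lookup
-- namespaces[elems[0]] is guarded by the membership test, so getD's default is unreachable.
def get_cn_tag (path : String) (namespaces : List (String × String)) : String :=
  let tags := PySem.Chars.splitOn path.toList ['/']
  let cn_tags := tags.foldl (fun acc tag =>
    let elems := PySem.Chars.splitOn tag [':']
    if elems.length == 2 &&
        PySem.Dict.contains ⟨namespaces⟩ (String.ofList (PySem.List.pyGetD elems 0 [])) then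
      acc ++ [['{'] ++ (PySem.Dict.getD (⟨namespaces⟩ : PySem.Dict String String)
                (String.ofList (PySem.List.pyGetD elems 0 [])) "").toList
              ++ ['}'] ++ PySem.List.pyGetD elems 1 []]
    else acc ++ [tag]) []
  String.ofList (PySem.Chars.join ['/'] cn_tags)

-- ===== PORT B =====
-- _segment(pre, post, colons, namespaces) from Source B
def pvSegment (namespaces : List (String × String)) (pre post : List Char) (colons : Nat) :
    List Char :=
  if colons == 1 && PySem.Dict.contains ⟨namespaces⟩ (String.ofList pre) then
    ['{'] ++ (PySem.Dict.getD (⟨namespaces⟩ : PySem.Dict String String)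
        (String.ofList pre) "").toList ++ ['}'] ++ post
  else if colons == 0 then pre
  else pre ++ ':' :: post

-- the character loop of Source B; state = (out, pre, post, colons)
def pvScan (namespaces : List (String × String)) :
    List Char → List (List Char) → List Char → List Char → Nat → List (List Char)
  | [], out, pre, post, colons => out ++ [pvSegment namespaces pre post colons]
  | c :: cs, out, pre, post, colons =>
    if c = '/' then
      pvScan namespaces cs (out ++ [pvSegment namespaces pre post colons]) [] [] 0
    else if c = ':' then
      pvScan namespaces cs out pre (if colons + 1 > 1 then post ++ [':'] else post) (colons + 1)
    else if colons = 0 then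
      pvScan namespaces cs out (pre ++ [c]) post colons
    else
      pvScan namespaces cs out pre (post ++ [c]) colons

def get_cn_tag_alt (path : String) (namespaces : List (String × String)) : String :=
  String.ofList (PySem.Chars.join ['/'] (pvScan namespaces path.toList [] [] [] 0))

-- ===== PRECONDITION & SPEC =====
def Spec_get_cn_tag (path : String) (namespaces : List (String × String)) (out : String) : Prop := out = get_cn_tag_alt path namespaces
instance (path : String) (namespaces : List (String × String)) (out : String) : Decidable (Spec_get_cn_tag path namespaces out) := by unfold Spec_get_cn_tag; infer_instance

-- ===== CLAIM (what is proved, stated in full; the proofs are below) =====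
def Claim_equal_get_cn_tag : Prop := ∀ (path : String) (namespaces : List (String × String)), Dom_get_cn_tag path namespaces → Spec_get_cn_tag path namespaces (get_cn_tag path namespaces)

-- ===== LEMMAS AND PROOFS =====

-- a structural split of a char list on a single separator character
def pvSplitCh (sep : Char) : List Char → List (List Char)
  | [] => [[]]
  | c :: cs => if c = sep then [] :: pvSplitCh sep cs else (pvSplitCh sep cs).modifyHead (c :: ·)

theorem pvSplitCh_ne_nil (sep : Char) (l : List Char) : pvSplitCh sep l ≠ [] := by
  induction l with
  | nil => simp [pvSplitCh]
  | cons c cs ih =>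
    simp only [pvSplitCh]
    split
    · simp
    · cases h : pvSplitCh sep cs with
      | nil => exact absurd h ih
      | cons a t => simp [List.modifyHead]

theorem pvSplitOn_go_eq (sep : Char) :
    ∀ (l : List Char) (fuel : Nat) (cur : List Char) (acc : List (List Char)),
      l.length < fuel →
      PySem.Chars.splitOn.go [sep] fuel l cur acc
        = acc.reverse ++ (pvSplitCh sep l).modifyHead (cur.reverse ++ ·) := by
  intro l
  induction l with
  | nil =>
    intro fuel cur acc h
    cases fuel with
    | zero => omega
    | succ f => simp [PySem.Chars.splitOn.go, pvSplitCh, List.modifyHead]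
  | cons c cs ih =>
    intro fuel cur acc h
    cases fuel with
    | zero => omega
    | succ f =>
      rw [PySem.Chars.splitOn.go]
      by_cases hc : c = sep
      · subst hc
        rw [if_pos (by simp [List.isPrefixOf])]
        simp only [List.length_cons] at h
        simp only [List.length_singleton, List.drop_succ_cons, List.drop_zero]
        rw [ih f [] (cur.reverse :: acc) (by omega)]
        obtain ⟨a, t, hsp⟩ := List.exists_cons_of_ne_nil (pvSplitCh_ne_nil c cs)
        simp [pvSplitCh, hsp, List.modifyHead]
      · rw [if_neg (by simp [List.isPrefixOf, beq_iff_eq]; exact fun h' => absurd h'.symm hc)]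
        simp only [List.length_cons] at h
        rw [ih f (c :: cur) acc (by omega)]
        obtain ⟨a, t, hsp⟩ := List.exists_cons_of_ne_nil (pvSplitCh_ne_nil sep cs)
        simp [pvSplitCh, if_neg hc, hsp, List.modifyHead]

theorem pvSplitOn_single (sep : Char) (l : List Char) :
    PySem.Chars.splitOn l [sep] = pvSplitCh sep l := by
  rw [PySem.Chars.splitOn, pvSplitOn_go_eq sep l (l.length + 1) [] [] (by omega)]
  obtain ⟨a, t, hsp⟩ := List.exists_cons_of_ne_nil (pvSplitCh_ne_nil sep l)
  simp [hsp, List.modifyHead]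

-- A's per-tag transformation, with the split in structural form
def pvTagF (ns : List (String × String)) (tag : List Char) : List Char :=
  let elems := pvSplitCh ':' tag
  if elems.length == 2 &&
      PySem.Dict.contains ⟨ns⟩ (String.ofList (PySem.List.pyGetD elems 0 [])) then
    ['{'] ++ (PySem.Dict.getD (⟨ns⟩ : PySem.Dict String String)
        (String.ofList (PySem.List.pyGetD elems 0 [])) "").toList
      ++ ['}'] ++ PySem.List.pyGetD elems 1 []
  else tag

theorem pvSplitCh_append (sep : Char) (ds l : List Char) (h : sep ∉ ds) :
    pvSplitCh sep (ds ++ l) = (pvSplitCh sep l).modifyHead (ds ++ ·) := by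
  induction ds with
  | nil =>
    obtain ⟨a, t, hsp⟩ := List.exists_cons_of_ne_nil (pvSplitCh_ne_nil sep l)
    simp [hsp, List.modifyHead]
  | cons d ds ih =>
    have hd : d ≠ sep := by simp at h; exact fun he => h.1 he.symm
    have h' : sep ∉ ds := by simp at h; exact fun hm => h.2 hm
    rw [List.cons_append]
    simp only [pvSplitCh, if_neg hd, ih h']
    obtain ⟨a, t, hsp⟩ := List.exists_cons_of_ne_nil (pvSplitCh_ne_nil sep l)
    simp [hsp, List.modifyHead]

theorem pvLength_splitCh (sep : Char) (l : List Char) :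
    (pvSplitCh sep l).length = l.count sep + 1 := by
  induction l with
  | nil => simp [pvSplitCh]
  | cons c cs ih =>
    simp only [pvSplitCh]
    by_cases hc : c = sep
    · simp [hc, ih]
    · simp [hc, ih]

-- the segment text that B's state (pre, post, colons) stands for
def pvChars (pre post : List Char) (colons : Nat) : List Char :=
  pre ++ (if colons = 0 then [] else ':' :: post)

-- B's loop invariant on its per-segment state
def pvInv (pre post : List Char) (colons : Nat) : Prop :=
  ':' ∉ pre ∧ (colons = 0 → post = []) ∧ (0 < colons → colons = post.count ':' + 1)

theorem pvSegment_eq (ns : List (String × String)) (pre post : List Char) (colons : Nat)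
    (h : pvInv pre post colons) :
    pvSegment ns pre post colons = pvTagF ns (pvChars pre post colons) := by
  obtain ⟨hpre, h0, hpos⟩ := h
  match colons with
  | 0 =>
    have hp := h0 rfl
    subst hp
    have : pvSplitCh ':' pre = [pre] := by
      have := pvSplitCh_append ':' pre [] hpre
      simpa [pvSplitCh, List.modifyHead] using this
    simp [pvSegment, pvTagF, pvChars, this]
  | 1 =>
    have hcnt : post.count ':' = 0 := by have := hpos (by omega); omega
    have hnp : ':' ∉ post := List.count_eq_zero.mp hcnt
    have hpost : pvSplitCh ':' post = [post] := by
      have := pvSplitCh_append ':' post [] hnp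
      simpa [pvSplitCh, List.modifyHead] using this
    have hsp : pvSplitCh ':' (pvChars pre post 1) = [pre, post] := by
      rw [pvChars, pvSplitCh_append ':' pre _ hpre]
      simp [pvSplitCh, hpost, List.modifyHead]
    simp only [pvTagF, hsp]
    simp [pvSegment, pvChars, PySem.List.pyGetD, PySem.List.pyGet?, PySem.List.pyIdx?,
      List.getElem?_cons_zero]
  | (n + 2) =>
    have hcnt : post.count ':' = n + 1 := by have := hpos (by omega); omega
    have hlen : (pvSplitCh ':' (pvChars pre post (n + 2))).length = n + 3 := by
      rw [pvLength_splitCh, pvChars]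
      have hp0 : pre.count ':' = 0 := List.count_eq_zero.mpr hpre
      simp [List.count_append, hp0, hcnt]
    simp only [pvTagF]
    rw [if_neg (by simp [hlen])]
    simp [pvSegment, pvChars]

theorem pvScan_eq (ns : List (String × String)) :
    ∀ (cs : List Char) (out : List (List Char)) (pre post : List Char) (colons : Nat),
      pvInv pre post colons →
      pvScan ns cs out pre post colons
        = out ++ List.map (pvTagF ns)
            ((pvSplitCh '/' cs).modifyHead (pvChars pre post colons ++ ·)) := by
  intro cs
  induction cs with
  | nil =>
    intro out pre post colons h
    simp [pvScan, pvSplitCh, List.modifyHead, pvSegment_eq ns pre post colons h]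
  | cons c cs ih =>
    intro out pre post colons h
    obtain ⟨a, t, hsp⟩ := List.exists_cons_of_ne_nil (pvSplitCh_ne_nil '/' cs)
    by_cases hc : c = '/'
    · subst hc
      rw [pvScan, if_pos rfl, ih _ [] [] 0 ⟨by simp, fun _ => rfl, by omega⟩]
      rw [pvSegment_eq ns pre post colons h]
      simp [pvSplitCh, hsp, List.modifyHead, pvChars]
    · obtain ⟨hpre, h0, hpos⟩ := h
      by_cases hcol : c = ':'
      · subst hcol
        rw [pvScan, if_neg hc, if_pos rfl]
        by_cases hz : colons = 0
        · subst hz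
          rw [if_neg (by omega)]
          rw [ih _ _ _ 1 ⟨hpre, by omega, by simp [h0 rfl]⟩]
          simp [pvSplitCh, hc, hsp, List.modifyHead, pvChars, h0 rfl]
        · rw [if_pos (by omega)]
          rw [ih _ _ _ (colons + 1)
            ⟨hpre, by omega, by have := hpos (by omega); simp [List.count_append]; omega⟩]
          simp [pvSplitCh, hc, hsp, List.modifyHead, pvChars, hz]
      · rw [pvScan, if_neg hc, if_neg hcol]
        by_cases hz : colons = 0
        · subst hz
          rw [if_pos rfl, ih _ _ _ 0
            ⟨by simp [hpre]; exact fun he => hcol he.symm, h0, by omega⟩]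
          simp [pvSplitCh, hc, hsp, List.modifyHead, pvChars]
        · rw [if_neg hz, ih _ _ _ colons
            ⟨hpre, by omega, by have := hpos (by omega); simp [List.count_append, hcol]; omega⟩]
          simp [pvSplitCh, hc, hsp, List.modifyHead, pvChars, hz]

theorem pvFoldl_tagF (ns : List (String × String)) (l : List (List Char))
    (acc : List (List Char)) :
    List.foldl (fun acc tag =>
      let elems := PySem.Chars.splitOn tag [':']
      if elems.length == 2 &&
          PySem.Dict.contains ⟨ns⟩ (String.ofList (PySem.List.pyGetD elems 0 [])) then
        acc ++ [['{'] ++ (PySem.Dict.getD (⟨ns⟩ : PySem.Dict String String)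
                  (String.ofList (PySem.List.pyGetD elems 0 [])) "").toList
                ++ ['}'] ++ PySem.List.pyGetD elems 1 []]
      else acc ++ [tag]) acc l = acc ++ l.map (pvTagF ns) := by
  induction l generalizing acc with
  | nil => simp
  | cons a l ih =>
    rw [List.foldl_cons, ih]
    simp only [pvSplitOn_single]
    split_ifs with h
    · show _ = acc ++ (pvTagF ns a :: List.map (pvTagF ns) l)
      simp only [pvTagF]
      rw [if_pos h]
      simp
    · show _ = acc ++ (pvTagF ns a :: List.map (pvTagF ns) l)
      simp only [pvTagF]
      rw [if_neg h]
      simp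

-- ===== VERDICT (by name: the statement is the Claim_ definition above) =====
theorem get_cn_tag_spec : Claim_equal_get_cn_tag := by
  intro path ns _
  show get_cn_tag path ns = get_cn_tag_alt path ns
  rw [get_cn_tag, get_cn_tag_alt]
  rw [pvScan_eq ns path.toList [] [] [] 0 ⟨by simp, fun _ => rfl, by omega⟩]
  rw [pvFoldl_tagF]
  obtain ⟨a, t, hsp⟩ := List.exists_cons_of_ne_nil (pvSplitCh_ne_nil '/' path.toList)
  simp [pvSplitOn_single, hsp, pvChars, List.modifyHead]
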